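-- pv_equiv track=rewrite | github.com/jeb26/Python-Scripts | assign6.py | moreVowels
-- ===== SOURCE A (Python) =====
-- def moreVowels(aStr, anInt):
--         aStr0 = aStr.lower()
--         numVowels = 0
--         for i in range(len(aStr0)):
--                 if aStr0[i] == 'a' or aStr0[i] == 'e' or aStr0[i] == 'i' or aStr0[i] == 'o' or aStr0[i] == 'u' or aStr0[i] == 'y':
--                         numVowels += 1
--         if numVowels > anInt:
--                 return True
--         else:
--                 return False
-- ===== SOURCE B (Python) =====
-- def moreVowels(aStr, anInt):
--     aStr0 = aStr.lower()
--     return sum(aStr0.count(v) for v in "aeiouy") > anInt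
-- ===== Notes on version B (the rewrite author's own statement) =====
-- stated objective: alternative
-- what changed: Replaces the single indexed counting loop with chained equality tests by six whole-string scans: one str.count pass per vowel, summing the six totals and comparing the sum to the threshold.
import Mathlib
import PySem

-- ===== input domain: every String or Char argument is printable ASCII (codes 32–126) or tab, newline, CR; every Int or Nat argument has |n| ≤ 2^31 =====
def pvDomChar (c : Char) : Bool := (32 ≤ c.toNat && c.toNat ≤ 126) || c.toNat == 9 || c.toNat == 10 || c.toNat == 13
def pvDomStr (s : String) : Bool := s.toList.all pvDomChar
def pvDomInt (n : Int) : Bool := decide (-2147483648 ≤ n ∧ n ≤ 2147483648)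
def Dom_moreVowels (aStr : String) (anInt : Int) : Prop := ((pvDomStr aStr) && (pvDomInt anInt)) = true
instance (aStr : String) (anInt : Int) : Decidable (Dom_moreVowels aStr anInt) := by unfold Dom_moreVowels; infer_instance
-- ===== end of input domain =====

-- B replaces A's single indexed counting loop by six per-vowel str.count scans whose totals are summed (alternative decomposition, same O(n) cost).

-- ===== PORT A =====
def moreVowels (aStr : String) (anInt : Int) : Bool :=
  let aStr0 := (PySem.Str.lower aStr).toList
  let numVowels : Int :=
    (PySem.List.pyRange 0 (aStr0.length : Int) 1).foldl
      (fun acc i =>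
        let c := PySem.List.pyGetD aStr0 i ' '
        if c == 'a' || c == 'e' || c == 'i' || c == 'o' || c == 'u' || c == 'y'
        then acc + 1 else acc) 0
  if numVowels > anInt then true else false

-- ===== PORT B =====
def moreVowels_alt (aStr : String) (anInt : Int) : Bool :=
  let aStr0 := PySem.Str.lower aStr
  decide ((((['a','e','i','o','u','y']).map
      (fun v => (PySem.Str.count aStr0 (String.ofList [v]) : Int))).sum) > anInt)

-- ===== PRECONDITION & SPEC =====
def Spec_moreVowels (aStr : String) (anInt : Int) (out : Bool) : Prop := out = moreVowels_alt aStr anInt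
instance (aStr : String) (anInt : Int) (out : Bool) : Decidable (Spec_moreVowels aStr anInt out) := by unfold Spec_moreVowels; infer_instance

-- ===== CLAIM =====
def Claim_equal_moreVowels : Prop := ∀ (aStr : String) (anInt : Int), Dom_moreVowels aStr anInt → Spec_moreVowels aStr anInt (moreVowels aStr anInt)

-- ===== LEMMAS AND PROOFS =====

-- a single-character needle: Python-style substring count = character count
theorem charsCount_singleton_go (c : Char) (l : List Char) (fuel acc : Nat)
    (h : l.length ≤ fuel) :
    PySem.Chars.count.go [c] fuel l acc = acc + l.count c := by
  induction l generalizing fuel acc with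
  | nil =>
    cases fuel <;> simp [PySem.Chars.count.go]
  | cons x t ih =>
    cases fuel with
    | zero => simp at h
    | succ f =>
      rw [PySem.Chars.count.go]
      have hpre : [c].isPrefixOf (x :: t) = (c == x) := by simp [List.isPrefixOf]
      rw [hpre]
      by_cases hx : c = x
      · subst hx
        rw [if_pos (by simp), List.length_singleton, List.drop_one, List.tail_cons,
          ih f (acc + 1) (by simp at h; omega)]
        simp
        omega
      · rw [if_neg (by simp [hx]), ih f acc (by simp at h; omega)]
        simp [eq_comm, hx]

theorem charsCount_singleton (c : Char) (l : List Char) :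
    PySem.Chars.count l [c] = l.count c := by
  simp [PySem.Chars.count, charsCount_singleton_go c l l.length 0 le_rfl]

theorem countP_vowels (l : List Char) :
    l.countP (fun c => c == 'a' || c == 'e' || c == 'i' || c == 'o' || c == 'u' || c == 'y')
      = l.count 'a' + l.count 'e' + l.count 'i' + l.count 'o' + l.count 'u' + l.count 'y' := by
  induction l with
  | nil => simp
  | cons x t ih =>
    simp only [List.countP_cons, List.count_cons, ih]
    by_cases h1 : x = 'a' <;> by_cases h2 : x = 'e' <;> by_cases h3 : x = 'i' <;>
      by_cases h4 : x = 'o' <;> by_cases h5 : x = 'u' <;> by_cases h6 : x = 'y' <;>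
      simp_all <;> omega

-- ===== VERDICT =====
theorem moreVowels_spec : Claim_equal_moreVowels := by
  intro aStr anInt _
  unfold Spec_moreVowels moreVowels moreVowels_alt
  simp only []
  rw [PySem.List.foldl_pyRange_zero_pyGetD' (PySem.Str.lower aStr).toList ' '
    (fun acc c => if c == 'a' || c == 'e' || c == 'i' || c == 'o' || c == 'u' || c == 'y'
        then acc + 1 else acc) 0]
  rw [PySem.List.foldl_if_add_one]
  simp [PySem.Str.count, charsCount_singleton, countP_vowels]
  constructor <;> intro h <;> omega
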